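-- pv_equiv track=rewrite | github.com/Ishwarendra/Contests | CODECHEF/2021/APR_2021/APRIL_LONG_2021/SSCRIPT.py | findStar
-- ===== SOURCE A (Python) =====
-- def findStar(str, nos):
-- 	count=0
-- 	i=0
-- 	while(i<len(str)):
-- 		if str[i]=="*":
-- 			count+=1
-- 		else:
-- 			count=0
-- 		if count==nos:
-- 			return True
-- 		i+=1
-- 	return count>=nos
-- ===== SOURCE B (Python) =====
-- def findStar(str, nos):
--     if nos > len(str):
--         return False
--     return "*" * nos in str
-- ===== Notes on version B (the rewrite author's own statement) =====
-- stated objective: idiomatic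
-- what changed: The manual while-loop tracking a consecutive-asterisk counter with an early return is replaced by a length guard plus a single substring membership test: '*' * nos in str.
import Mathlib
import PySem

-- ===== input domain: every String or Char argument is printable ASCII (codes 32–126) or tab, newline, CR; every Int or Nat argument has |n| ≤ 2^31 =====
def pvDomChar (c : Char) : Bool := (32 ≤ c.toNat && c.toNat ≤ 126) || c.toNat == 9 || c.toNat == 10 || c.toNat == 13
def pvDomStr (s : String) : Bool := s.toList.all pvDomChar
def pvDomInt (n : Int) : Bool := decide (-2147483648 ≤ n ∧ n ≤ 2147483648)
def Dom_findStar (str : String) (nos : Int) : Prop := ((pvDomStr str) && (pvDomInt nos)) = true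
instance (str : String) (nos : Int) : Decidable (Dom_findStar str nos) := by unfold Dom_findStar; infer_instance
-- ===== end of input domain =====

-- B replaces A's manual consecutive-counter loop by a substring membership test ('*' * nos in str); same return value, idiomatic.

-- ===== PORT A =====
-- A's while loop over the characters, carrying the consecutive-'*' counter, with the early return on count == nos.
def findStarLoop (cs : List Char) (count : Int) (nos : Int) : Bool :=
  match cs with
  | [] => decide (count ≥ nos)
  | c :: rest =>
    let count' := if c = '*' then count + 1 else 0
    if count' = nos then true else findStarLoop rest count' nos

def findStar (str : String) (nos : Int) : Bool :=
  findStarLoop str.toList 0 nos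

-- ===== PORT B =====
-- guard: a run longer than the string cannot occur; else '"*" * nos in str'
-- (the run is empty for nos ≤ 0) as a substring membership test.
def findStar_alt (str : String) (nos : Int) : Bool :=
  if PySem.Str.len str < nos then false
  else PySem.Str.isIn (String.ofList (List.replicate nos.toNat '*')) str

-- ===== PRECONDITION & SPEC =====
def Spec_findStar (str : String) (nos : Int) (out : Bool) : Prop := out = findStar_alt str nos
instance (str : String) (nos : Int) (out : Bool) : Decidable (Spec_findStar str nos out) := by unfold Spec_findStar; infer_instance

-- ===== CLAIM (what is proved, stated in full; the proofs are below) =====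
def Claim_equal_findStar : Prop := ∀ (str : String) (nos : Int), Dom_findStar str nos → Spec_findStar str nos (findStar str nos)

-- ===== LEMMAS AND PROOFS =====

-- For nos ≤ 0 the loop always returns true (the early return is true, and at the end count ≥ 0 ≥ nos).
theorem findStarLoop_nonpos (cs : List Char) (count nos : Int)
    (hc : 0 ≤ count) (hn : nos ≤ 0) : findStarLoop cs count nos = true := by
  induction cs generalizing count with
  | nil => simp [findStarLoop]; omega
  | cons c rest ih =>
    simp only [findStarLoop]
    by_cases hstar : c = '*'
    · simp only [if_pos hstar]
      by_cases heq : count + 1 = nos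
      · simp [heq]
      · simp only [if_neg heq]; exact ih _ (by omega)
    · simp only [if_neg hstar]
      by_cases heq : (0 : Int) = nos
      · simp [← heq]
      · simp only [if_neg heq]; exact ih _ le_rfl

-- shorter replicate is a prefix of a longer one
theorem replicate_prefix_mono {α : Type} (a : α) {m n : Nat} (h : m ≤ n) :
    List.replicate m a <+: List.replicate n a :=
  ⟨List.replicate (n - m) a, by rw [← List.replicate_add]; congr 1; omega⟩

-- For 0 ≤ count < nos, the loop returns true iff the remaining requirement (nos - count stars)
-- is a prefix of cs, or a full run of nos stars occurs as an infix of cs.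
theorem findStarLoop_pos (cs : List Char) (count nos : Int)
    (hc : 0 ≤ count) (hn : count < nos) :
    findStarLoop cs count nos = true ↔
      (List.replicate (nos - count).toNat '*' <+: cs
        ∨ List.replicate nos.toNat '*' <:+: cs) := by
  induction cs generalizing count with
  | nil =>
    have h1 : (nos - count).toNat ≠ 0 := by omega
    have h2 : nos.toNat ≠ 0 := by omega
    simp [findStarLoop, List.prefix_nil, List.infix_nil, List.replicate_eq_nil_iff, h1, h2]
    omega
  | cons c rest ih =>
    obtain ⟨k2, hk2⟩ : ∃ k, nos.toNat = k + 1 := ⟨nos.toNat - 1, by omega⟩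
    by_cases hstar : c = '*'
    · subst hstar
      have hstep : findStarLoop ('*' :: rest) count nos
          = (if count + 1 = nos then true else findStarLoop rest (count + 1) nos) := by
        simp [findStarLoop]
      rw [hstep]
      have hrep : (nos - count).toNat = ((nos - (count + 1)).toNat) + 1 := by omega
      by_cases heq : count + 1 = nos
      · -- early return true; a single-star prefix requirement holds
        have h1 : (nos - count).toNat = 1 := by omega
        rw [if_pos heq, h1]
        simp only [List.replicate_succ, List.replicate_zero, true_iff]
        exact Or.inl (List.cons_prefix_cons.mpr ⟨rfl, List.nil_prefix⟩)
      · rw [if_neg heq, ih (count + 1) (by omega) (by omega)]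
        constructor
        · rintro (h | h)
          · left; rw [hrep, List.replicate_succ]
            exact List.cons_prefix_cons.mpr ⟨rfl, h⟩
          · right; exact h.trans (List.suffix_cons '*' rest).isInfix
        · rintro (h | h)
          · rw [hrep, List.replicate_succ] at h
            exact Or.inl (List.cons_prefix_cons.mp h).2
          · rcases List.infix_cons_iff.mp h with hp | hi
            · rw [hk2, List.replicate_succ] at hp
              exact Or.inl ((replicate_prefix_mono '*' (by omega)).trans
                (List.cons_prefix_cons.mp hp).2)
            · exact Or.inr hi
    · -- non-star: counter resets to 0; no replicate of '*' can start at c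
      have hstep : findStarLoop (c :: rest) count nos
          = (if (0 : Int) = nos then true else findStarLoop rest 0 nos) := by
        simp [findStarLoop, hstar]
      rw [hstep, if_neg (by omega : ¬ (0 : Int) = nos), ih 0 le_rfl (by omega), Int.sub_zero]
      obtain ⟨k1, hk1⟩ : ∃ k, (nos - count).toNat = k + 1 := ⟨(nos - count).toNat - 1, by omega⟩
      constructor
      · rintro (h | h)
        · exact Or.inr (h.isInfix.trans (List.suffix_cons c rest).isInfix)
        · exact Or.inr (h.trans (List.suffix_cons c rest).isInfix)
      · rintro (h | h)
        · rw [hk1, List.replicate_succ] at h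
          exact absurd (List.cons_prefix_cons.mp h).1.symm hstar
        · rcases List.infix_cons_iff.mp h with hp | hi
          · rw [hk2, List.replicate_succ] at hp
            exact absurd (List.cons_prefix_cons.mp hp).1.symm hstar
          · exact Or.inr hi

-- ===== VERDICT (by name: the statement is the Claim_ definition above) =====
theorem findStar_spec : Claim_equal_findStar := by
  intro str nos _
  unfold Spec_findStar findStar findStar_alt
  rw [PySem.Str.len_eq]
  by_cases hlen : (str.toList.length : Int) < nos
  · rw [if_pos hlen, Bool.eq_iff_iff]
    have hpos : 0 < nos := by
      have := Int.natCast_nonneg str.toList.length; omega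
    rw [findStarLoop_pos _ 0 nos le_rfl hpos, Int.sub_zero]
    simp only [Bool.false_eq_true, iff_false]
    rintro (h | h)
    · have := h.length_le; rw [List.length_replicate] at this; omega
    · have := h.length_le; rw [List.length_replicate] at this; omega
  · rw [if_neg hlen, Bool.eq_iff_iff, PySem.Str.isIn_iff_infix]
    by_cases hn : 0 < nos
    · rw [findStarLoop_pos _ 0 nos le_rfl hn, Int.sub_zero]
      simp only [String.toList_ofList]
      constructor
      · rintro (h | h)
        · exact h.isInfix
        · exact h
      · exact Or.inr
    · have h0 : nos.toNat = 0 := by omega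
      rw [findStarLoop_nonpos _ 0 nos le_rfl (by omega)]
      simp [h0, List.nil_infix]
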